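-- pv_equiv track=rewrite | github.com/melloo21/CS5228_project | utils/melissa_utils.py | encoding_vehicle_type_custom
-- ===== SOURCE A (Python) =====
-- def encoding_vehicle_type_custom(type_of_vehicle: str):
--     """
--     Groups the different types of vehicles into a smaller number
--     of categories to handle sparsity issues by assigning a number
--     to each meso-group of vehicles. After this has been
--     run, the column should be made categorical
--     """
--     VEHICLE_CATEGORIES = [
--     {"sports car"},
--     {"luxury sedan", "suv"},
--     {"others", "mpv", "stationwagon", "mid-sized sedan"},
--     ]
--     if not type_of_vehicle or not isinstance(type_of_vehicle, str):
--         type_of_vehicle = "others"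
--
--     for cat_num, cat in enumerate(VEHICLE_CATEGORIES, start=1):
--         if type_of_vehicle in cat:
--             return cat_num
--
--     return 0
-- ===== SOURCE B (Python) =====
-- def encoding_vehicle_type_custom(type_of_vehicle: str):
--     """Arithmetical formulation: the category number is a weighted sum of three
--     disjoint membership indicators, so there is no loop, no dict and no scan."""
--     if not type_of_vehicle or not isinstance(type_of_vehicle, str):
--         type_of_vehicle = "others"
--     return (1 * (type_of_vehicle == "sports car")
--             + 2 * (type_of_vehicle in ("luxury sedan", "suv"))
--             + 3 * (type_of_vehicle in ("others", "mpv", "stationwagon", "mid-sized sedan")))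
-- ===== Notes on version B (the rewrite author's own statement) =====
-- stated objective: alternative
-- what changed: Replaced the enumerate-over-three-sets membership loop and its early return with a branch-free arithmetical formulation: the category number is computed as a weighted sum of three disjoint boolean membership indicators (1*b1 + 2*b2 + 3*b3), which is 0 for unknown inputs; no iteration, no early return, no mapping structure.
import Mathlib
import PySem

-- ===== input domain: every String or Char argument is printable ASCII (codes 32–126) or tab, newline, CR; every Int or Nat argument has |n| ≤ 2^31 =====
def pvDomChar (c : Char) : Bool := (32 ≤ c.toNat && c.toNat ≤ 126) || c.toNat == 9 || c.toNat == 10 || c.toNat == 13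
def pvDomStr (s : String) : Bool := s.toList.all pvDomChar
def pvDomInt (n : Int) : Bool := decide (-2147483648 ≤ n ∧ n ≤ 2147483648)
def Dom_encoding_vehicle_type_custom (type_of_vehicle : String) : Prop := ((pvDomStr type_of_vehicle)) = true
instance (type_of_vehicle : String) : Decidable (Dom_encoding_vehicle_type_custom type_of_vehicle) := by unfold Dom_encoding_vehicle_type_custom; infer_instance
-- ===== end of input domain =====

-- B computes the category as a weighted sum of three disjoint membership indicators instead of A's enumerate-over-sets loop (alternative formulation; same observable behaviour).

-- ===== PORT A =====
-- helper for A: the enumerate-over-categories loop (cat_num starts at 1)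
def pvCatLoop : Int → List (PySem.Set String) → String → Int
  | _, [], _ => 0
  | n, c :: rest, t => if PySem.Set.contains c t then n else pvCatLoop (n + 1) rest t

def encoding_vehicle_type_custom (type_of_vehicle : String) : Int :=
  let cats : List (PySem.Set String) :=
    [PySem.Set.ofList ["sports car"],
     PySem.Set.ofList ["luxury sedan", "suv"],
     PySem.Set.ofList ["others", "mpv", "stationwagon", "mid-sized sedan"]]
  let t := if type_of_vehicle = "" then "others" else type_of_vehicle
  pvCatLoop 1 cats t

-- ===== PORT B =====
-- B: 1*b1 + 2*b2 + 3*b3 over the three disjoint membership tests; Python bools become 0/1 ints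
def pvB2I (b : Bool) : Int := if b then 1 else 0

def encoding_vehicle_type_custom_alt (type_of_vehicle : String) : Int :=
  let t := if type_of_vehicle = "" then "others" else type_of_vehicle
  1 * pvB2I (t == "sports car")
    + 2 * pvB2I (t == "luxury sedan" || t == "suv")
    + 3 * pvB2I (t == "others" || t == "mpv" || t == "stationwagon" || t == "mid-sized sedan")

-- ===== PRECONDITION & SPEC =====
def Spec_encoding_vehicle_type_custom (type_of_vehicle : String) (out : Int) : Prop := out = encoding_vehicle_type_custom_alt type_of_vehicle
instance (type_of_vehicle : String) (out : Int) : Decidable (Spec_encoding_vehicle_type_custom type_of_vehicle out) := by unfold Spec_encoding_vehicle_type_custom; infer_instance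

-- ===== CLAIM (what is proved, stated in full; the proofs are below) =====
def Claim_equal_encoding_vehicle_type_custom : Prop := ∀ (type_of_vehicle : String), Dom_encoding_vehicle_type_custom type_of_vehicle → Spec_encoding_vehicle_type_custom type_of_vehicle (encoding_vehicle_type_custom type_of_vehicle)

-- ===== LEMMAS AND PROOFS =====

-- ===== VERDICT (by name: the statement is the Claim_ definition above) =====
theorem encoding_vehicle_type_custom_spec : Claim_equal_encoding_vehicle_type_custom := by
  intro t _
  unfold Spec_encoding_vehicle_type_custom
  unfold encoding_vehicle_type_custom encoding_vehicle_type_custom_alt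
  by_cases h0 : t = ""
  · simp only [h0]; decide
  · simp only [if_neg h0]
    by_cases h1 : t = "sports car"
    · subst h1; decide
    by_cases h2 : t = "luxury sedan"
    · subst h2; decide
    by_cases h3 : t = "suv"
    · subst h3; decide
    by_cases h4 : t = "others"
    · subst h4; decide
    by_cases h5 : t = "mpv"
    · subst h5; decide
    by_cases h6 : t = "stationwagon"
    · subst h6; decide
    by_cases h7 : t = "mid-sized sedan"
    · subst h7; decide
    simp [pvCatLoop, pvB2I, PySem.Set.contains, PySem.Set.ofList,
          h1, h2, h3, h4, h5, h6, h7]
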